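-- pv_equiv track=rewrite | github.com/Darkness1853/programming-Python | lab8/8.1lab.py | enter_number
-- ===== SOURCE A (Python) =====
-- dictionary = {
--     '1': '.,?!:',
--     '2': 'ABC',
--     '3': 'DEF',
--     '4': 'GHI',
--     '5': 'JKL',
--     '6': 'MNO',
--     '7': 'PQRS',
--     '8': 'TUV',
--     '9': 'WXYZ',
--     '0': ' '
-- }
--
-- def enter_number(number_press):
--     result = ""
--     cnt = 0
--     current_number = ""
--
--     for char in number_press:
--         if char == current_number:
--             cnt += 1
--         else:
--             if current_number:
--                 symbols = dictionary.get(current_number)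
--                 if symbols:
--                     # Обработка нажатий
--                     index = (cnt - 1) % len(symbols)  # Индекс в зависимости от нажатий
--                     if len(result) == 0 or result[-1] == ' ':
--                         result += symbols[index].upper()
--                     else:
--                         result += symbols[index].lower()  # Заглавная ставиться, если первое слово или после пробела
--
--             current_number = char  # Запоминаем текущую цифру
--             cnt = 1  # Сбрасываем счётчик нажатий
--
--     # Обработка последнего нажатия
--     if current_number:
--         symbols = dictionary.get(current_number)
--         if symbols:
--             index = (cnt - 1) % len(symbols)
--             if len(result) == 0 or result[-1] == ' ':
--                 result += symbols[index].upper()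
--             else:
--                 result += symbols[index].lower()
--
--     return result
-- ===== SOURCE B (Python) =====
-- dictionary = {
--     '1': '.,?!:',
--     '2': 'ABC',
--     '3': 'DEF',
--     '4': 'GHI',
--     '5': 'JKL',
--     '6': 'MNO',
--     '7': 'PQRS',
--     '8': 'TUV',
--     '9': 'WXYZ',
--     '0': ' '
-- }
--
-- def enter_number(number_press):
--     # Pass 1: group consecutive identical keypresses and decode each run
--     # (runs whose key is not in the table are skipped).
--     decoded = []
--     i = 0
--     n = len(number_press)
--     while i < n:
--         j = i
--         while j < n and number_press[j] == number_press[i]: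
--             j += 1
--         symbols = dictionary.get(number_press[i])
--         if symbols:
--             decoded.append(symbols[(j - i - 1) % len(symbols)])
--         i = j
--     # Pass 2: apply the casing rule: uppercase for the first letter and
--     # after a space, lowercase otherwise.
--     out = []
--     prev = None
--     for ch in decoded:
--         if prev is None or prev == ' ':
--             out.append(ch.upper())
--         else:
--             out.append(ch.lower())
--         prev = ch
--     return ''.join(out)
-- ===== Notes on version B (the rewrite author's own statement) =====
-- stated objective: simpler
-- what changed: Replaces A's single interleaved state machine (pending-key counter, inline flushes, casing decided from the output string built so far) by two independent passes: pass 1 groups consecutive identical keypresses and decodes each run to its symbol, pass 2 applies the capitalize-after-space rule over the decoded list.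
import Mathlib
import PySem

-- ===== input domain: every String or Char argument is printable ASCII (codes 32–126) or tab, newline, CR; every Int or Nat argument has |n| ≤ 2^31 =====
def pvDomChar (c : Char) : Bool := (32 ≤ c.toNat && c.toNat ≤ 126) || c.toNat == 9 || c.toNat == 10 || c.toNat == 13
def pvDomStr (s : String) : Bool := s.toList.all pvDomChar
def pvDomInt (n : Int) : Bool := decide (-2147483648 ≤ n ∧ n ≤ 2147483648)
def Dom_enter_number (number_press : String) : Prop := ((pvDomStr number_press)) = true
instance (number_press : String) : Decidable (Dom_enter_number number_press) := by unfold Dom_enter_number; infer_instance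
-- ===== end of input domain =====

-- B splits A's single interleaved state machine into two passes (decode runs, then apply casing); same return value, objective: simpler.

-- the module-level `dictionary` (keys are 1-char strings, modelled as Char; values as their char lists)
def pvDictionary : PySem.Dict Char (List Char) :=
  PySem.Dict.ofList
    [('1', ".,?!:".toList), ('2', "ABC".toList), ('3', "DEF".toList),
     ('4', "GHI".toList), ('5', "JKL".toList), ('6', "MNO".toList),
     ('7', "PQRS".toList), ('8', "TUV".toList), ('9', "WXYZ".toList),
     ('0', " ".toList)]

-- ===== PORT A =====
-- A's `result` is the list of output chars; `current_number` ('' or one char) is an Option Char.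
-- `symbols[index]` is always in range (index = (cnt-1) % len with len > 0), so pyGetD is exact;
-- `if symbols:` is the some/none match (all dictionary values are nonempty).
def pvEmitA (result : List Char) (cnt : Int) (current : Char) : List Char :=
  match pvDictionary.get? current with
  | none => result
  | some symbols =>
    let index := PySem.Int.mod (cnt - 1) (symbols.length : Int)
    let ch := PySem.List.pyGetD symbols index ' '
    if result = [] ∨ PySem.List.pyGet? result (-1) = some ' ' then
      result ++ [PySem.Chars.upperChar ch]
    else
      result ++ [PySem.Chars.lowerChar ch]

def pvStepA (st : List Char × Int × Option Char) (char : Char) : List Char × Int × Option Char :=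
  match st with
  | (result, cnt, current) =>
    if some char = current then (result, cnt + 1, current)
    else
      match current with
      | none => (result, 1, some char)
      | some c => (pvEmitA result cnt c, 1, some char)

def enter_number (number_press : String) : String :=
  match number_press.toList.foldl pvStepA ([], 0, none) with
  | (result, cnt, current) =>
    match current with
    | none => String.mk result
    | some c => String.mk (pvEmitA result cnt c)

-- ===== PORT B =====
-- pass 1 helpers: the inner while loop (count the run of `c` at the head) …
def pvTakeRun (c : Char) : List Char → Nat × List Char
  | [] => (0, [])
  | d :: rest => if d = c then ((pvTakeRun c rest).1 + 1, (pvTakeRun c rest).2) else (0, d :: rest)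

theorem pvTakeRun_len (c : Char) (l : List Char) : (pvTakeRun c l).2.length ≤ l.length := by
  induction l with
  | nil => simp [pvTakeRun]
  | cons d rest ih => by_cases h : d = c <;> simp [pvTakeRun, h] <;> omega

-- … and the outer while loop: split the input into (key, run length) pairs
def pvRuns : List Char → List (Char × Nat)
  | [] => []
  | c :: rest => (c, (pvTakeRun c rest).1 + 1) :: pvRuns (pvTakeRun c rest).2
termination_by l => l.length
decreasing_by
  have := pvTakeRun_len c rest; simp; omega

-- decode each run, skipping keys absent from the table (same in-range indexing as A)
def pvDecode : List (Char × Nat) → List Char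
  | [] => []
  | (c, k) :: rs =>
    match pvDictionary.get? c with
    | none => pvDecode rs
    | some symbols =>
      PySem.List.pyGetD symbols (PySem.Int.mod ((k : Int) - 1) (symbols.length : Int)) ' ' :: pvDecode rs

-- pass 2: the casing rule, tracking the previously decoded char
def pvCase : Option Char → List Char → List Char
  | _, [] => []
  | prev, ch :: rest =>
    (if prev = none ∨ prev = some ' ' then PySem.Chars.upperChar ch else PySem.Chars.lowerChar ch)
      :: pvCase (some ch) rest

def enter_number_alt (number_press : String) : String :=
  String.mk (pvCase none (pvDecode (pvRuns number_press.toList)))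

-- ===== PRECONDITION & SPEC =====
def Spec_enter_number (number_press : String) (out : String) : Prop := out = enter_number_alt number_press
instance (number_press : String) (out : String) : Decidable (Spec_enter_number number_press out) := by unfold Spec_enter_number; infer_instance

-- ===== CLAIM (what is proved, stated in full; the proofs are below) =====
def Claim_equal_enter_number : Prop := ∀ (number_press : String), Dom_enter_number number_press → Spec_enter_number number_press (enter_number number_press)

-- ===== LEMMAS AND PROOFS =====

-- upper/lower map ' ' to ' ' and nothing else to ' '
theorem pv_upper_space (c : Char) : PySem.Chars.upperChar c = ' ' ↔ c = ' ' := by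
  unfold PySem.Chars.upperChar PySem.Chars.islower
  split
  · next h =>
    simp at h
    have h1 : 97 ≤ c.toNat := h.1
    have h2 : c.toNat ≤ 122 := h.2
    have hv : (c.toNat - 32).isValidChar := Or.inl (by omega)
    constructor
    · intro he
      have h3 := congrArg Char.toNat he
      rw [Char.toNat_ofNat] at h3
      simp [hv] at h3
      have : ' '.toNat = 32 := by decide
      omega
    · intro he
      subst he
      have : ' '.toNat = 32 := by decide
      omega
  · simp

theorem pv_lower_space (c : Char) : PySem.Chars.lowerChar c = ' ' ↔ c = ' ' := by
  unfold PySem.Chars.lowerChar PySem.Chars.isupper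
  split
  · next h =>
    simp at h
    have h1 : 65 ≤ c.toNat := h.1
    have h2 : c.toNat ≤ 90 := h.2
    have hv : (c.toNat + 32).isValidChar := Or.inl (by omega)
    constructor
    · intro he
      have h3 := congrArg Char.toNat he
      rw [Char.toNat_ofNat] at h3
      simp [hv] at h3
      have : ' '.toNat = 32 := by decide
      omega
    · intro he
      subst he
      have : ' '.toNat = 32 := by decide
      omega
  · simp

-- invariant linking A's built result with B's previously decoded char
def pvInv (res : List Char) (prev : Option Char) : Prop :=
  (res = [] ↔ prev = none) ∧ (res.getLast? = some ' ' ↔ prev = some ' ')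

-- merging a pending run (c, m) onto a run list
def pvConsRun (c : Char) (m : Nat) : List (Char × Nat) → List (Char × Nat)
  | [] => [(c, m)]
  | (d, k) :: rs => if c = d then (c, m + k) :: rs else (c, m) :: (d, k) :: rs

theorem pvConsRun_runs (c : Char) (m : Nat) (l : List Char) :
    pvConsRun c m (pvRuns l) = (c, m + (pvTakeRun c l).1) :: pvRuns (pvTakeRun c l).2 := by
  cases l with
  | nil => simp [pvRuns, pvConsRun, pvTakeRun]
  | cons d rest =>
    rw [pvRuns]
    by_cases h : c = d
    · subst h
      simp [pvConsRun, pvTakeRun]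
    · simp [pvConsRun, h, pvTakeRun, Ne.symm h, pvRuns]

-- A's emit condition agrees with B's casing condition under the invariant
theorem pvCond_iff (res : List Char) (prev : Option Char) (hinv : pvInv res prev) :
    (res = [] ∨ PySem.List.pyGet? res (-1) = some ' ') ↔ (prev = none ∨ prev = some ' ') := by
  rw [PySem.List.pyGet?_neg_one]
  exact or_congr hinv.1 hinv.2

-- emitting the cased form of ch preserves the invariant
theorem pvInv_step (res : List Char) (prev : Option Char) (ch ch' : Char)
    (hch : ch' = (if prev = none ∨ prev = some ' ' then PySem.Chars.upperChar ch
                  else PySem.Chars.lowerChar ch)) :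
    pvInv (res ++ [ch']) (some ch) := by
  constructor
  · simp
  · have hsp : ch' = ' ' ↔ ch = ' ' := by
      rw [hch]; split
      · exact pv_upper_space ch
      · exact pv_lower_space ch
    simp [List.getLast?_append, hsp]

-- A's trailing flush block, as a function of the loop state (proof helper)
def pvFlush (st : List Char × Int × Option Char) : List Char :=
  match st with
  | (result, cnt, current) =>
    match current with
    | none => result
    | some c => pvEmitA result cnt c

-- the main loop/flush ↔ two-pass correspondence
theorem pvMain (l : List Char) (c : Char) (m : Nat) (res : List Char) (prev : Option Char)
    (hm : 1 ≤ m) (hinv : pvInv res prev) :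
    pvFlush (l.foldl pvStepA (res, (m : Int), some c)) =
      res ++ pvCase prev (pvDecode (pvConsRun c m (pvRuns l))) := by
  induction l generalizing c m res prev with
  | nil =>
    simp only [List.foldl_nil, pvRuns, pvConsRun, pvDecode, pvFlush, pvEmitA]
    cases hdc : pvDictionary.get? c with
    | none => simp [pvCase]
    | some symbols =>
      simp only [pvCase]
      by_cases hc : prev = none ∨ prev = some ' '
      · rw [if_pos ((pvCond_iff res prev hinv).mpr hc), if_pos hc]
      · rw [if_neg (fun h => hc ((pvCond_iff res prev hinv).mp h)), if_neg hc]
  | cons d rest ih =>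
    rw [List.foldl_cons]
    by_cases hdc : d = c
    · subst hdc
      have hstep : pvStepA (res, (m : Int), some d) d = (res, ((m + 1 : Nat) : Int), some d) := by
        simp [pvStepA]
      rw [hstep, ih d (m + 1) res prev (by omega) hinv]
      have hcr : pvConsRun d m (pvRuns (d :: rest)) = pvConsRun d (m + 1) (pvRuns rest) := by
        rw [pvConsRun_runs, pvConsRun_runs]
        simp [pvTakeRun]
        omega
      rw [hcr]
    · have hstep : pvStepA (res, (m : Int), some c) d = (pvEmitA res m c, ((1 : Nat) : Int), some d) := by
        simp [pvStepA, hdc]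
      rw [hstep]
      have hcr : pvConsRun c m (pvRuns (d :: rest)) = (c, m) :: pvConsRun d 1 (pvRuns rest) := by
        rw [pvConsRun_runs d 1 rest, pvRuns]
        simp [pvConsRun, Ne.symm hdc]
        omega
      rw [hcr]
      cases hdict : pvDictionary.get? c with
      | none =>
        have hemit : pvEmitA res m c = res := by simp [pvEmitA, hdict]
        rw [hemit, ih d 1 res prev (by omega) hinv]
        simp [pvDecode, hdict]
      | some symbols =>
        simp only [pvDecode, hdict, pvCase]
        set ch := PySem.List.pyGetD symbols (PySem.Int.mod ((m : Int) - 1) (symbols.length : Int)) ' ' with hchdef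
        set ch' := (if prev = none ∨ prev = some ' ' then PySem.Chars.upperChar ch
                    else PySem.Chars.lowerChar ch) with hch'
        have hemit : pvEmitA res m c = res ++ [ch'] := by
          rw [pvEmitA]
          simp only [hdict]
          rw [hch']
          by_cases hc : prev = none ∨ prev = some ' '
          · rw [if_pos hc, if_pos ((pvCond_iff res prev hinv).mpr hc)]
          · rw [if_neg hc, if_neg (fun h => hc ((pvCond_iff res prev hinv).mp h))]
        rw [hemit, ih d 1 (res ++ [ch']) (some ch) (by omega)
          (pvInv_step res prev ch ch' hch')]
        simp

-- ===== VERDICT (by name: the statement is the Claim_ definition above) =====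
theorem enter_number_spec : Claim_equal_enter_number := by
  intro s _
  unfold Spec_enter_number enter_number enter_number_alt
  have key : ∀ l : List Char,
      pvFlush (l.foldl pvStepA ([], (0 : Int), none)) = pvCase none (pvDecode (pvRuns l)) := by
    intro l
    cases l with
    | nil => simp [pvFlush, pvRuns, pvDecode, pvCase]
    | cons x rest =>
      rw [List.foldl_cons]
      have hstep : pvStepA ([], (0 : Int), none) x = ([], ((1 : Nat) : Int), some x) := by
        simp [pvStepA]
      have hinv : pvInv [] none := by constructor <;> simp
      rw [hstep, pvMain rest x 1 [] none (by omega) hinv]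
      have hcr : pvConsRun x 1 (pvRuns rest) = pvRuns (x :: rest) := by
        rw [pvConsRun_runs, pvRuns]
        simp
        omega
      rw [hcr]
      simp
  have hkey := key s.toList
  rcases hfold : s.toList.foldl pvStepA ([], (0 : Int), none) with ⟨r, cnt, cur⟩
  rw [hfold] at hkey
  cases cur with
  | none => simp only [pvFlush] at hkey; exact congrArg String.mk hkey
  | some c => simp only [pvFlush] at hkey; exact congrArg String.mk hkey
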